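-- pv_equiv track=rewrite | github.com/ChahelPaatur/Self-Modifying-Program-Synthesis-via-Online-Library-Evolution | common/object_ops.py | duplicate_objects
-- ===== SOURCE A (Python) =====
-- from typing import List, Dict, Tuple, Set, Optional
-- from collections import deque
--
-- Grid = List[List[int]]
--
-- def find_connected_components(grid: Grid, bg_color: int = 0, connectivity: int = 4) -> List[Set[Tuple[int, int]]]:
--     """
--     Find all connected components (objects) in grid.
--
--     Args:
--         grid: Input grid
--         bg_color: Background color to ignore
--         connectivity: 4 or 8 (neighbors)
--
--     Returns:
--         List of sets, each containing (row, col) coordinates of an object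
--     """
--     if not grid:
--         return []
--
--     h, w = len(grid), len(grid[0])
--     visited = [[False] * w for _ in range(h)]
--     components = []
--
--     def bfs(start_r, start_c, color):
--         """BFS to find connected component"""
--         component = set()
--         queue = deque([(start_r, start_c)])
--         visited[start_r][start_c] = True
--
--         while queue:
--             r, c = queue.popleft()
--             component.add((r, c))
--
--             # Get neighbors based on connectivity
--             neighbors = [(r-1, c), (r+1, c), (r, c-1), (r, c+1)]
--             if connectivity == 8:
--                 neighbors += [(r-1, c-1), (r-1, c+1), (r+1, c-1), (r+1, c+1)]
--
--             for nr, nc in neighbors: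
--                 if 0 <= nr < h and 0 <= nc < w and not visited[nr][nc]:
--                     if grid[nr][nc] == color:
--                         visited[nr][nc] = True
--                         queue.append((nr, nc))
--
--         return component
--
--     # Find all components
--     for r in range(h):
--         for c in range(w):
--             if not visited[r][c] and grid[r][c] != bg_color:
--                 comp = bfs(r, c, grid[r][c])
--                 if comp:
--                     components.append(comp)
--
--     return components
--
-- def duplicate_objects(grid: Grid, count: int = 2, bg_color: int = 0) -> Grid:
--     """Duplicate all objects horizontally"""
--     components = find_connected_components(grid, bg_color)
--     if not components or count < 1:
--         return grid
--
--     h, w = len(grid), len(grid[0])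
--     result = [[bg_color] * (w * count) for _ in range(h)]
--
--     for i in range(count):
--         offset = w * i
--         for r in range(h):
--             for c in range(w):
--                 result[r][offset + c] = grid[r][c]
--
--     return result
-- ===== SOURCE B (Python) =====
-- def duplicate_objects(grid, count=2, bg_color=0):
--     """Duplicate all objects horizontally"""
--     if not grid:
--         return grid
--     h, w = len(grid), len(grid[0])
--     has = any(grid[r][c] != bg_color for r in range(h) for c in range(w))
--     if not has or count < 1:
--         return grid
--     return [grid[r][:w] * count for r in range(h)]
-- ===== Notes on version B (the rewrite author's own statement) =====
-- stated objective: simpler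
-- what changed: B drops the connected-component BFS entirely: a single short-circuiting scan for any non-background cell replaces find_connected_components, and the output is built directly as row[:w]*count per row instead of filling a preallocated matrix cell by cell with a triple loop.
import Mathlib
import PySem

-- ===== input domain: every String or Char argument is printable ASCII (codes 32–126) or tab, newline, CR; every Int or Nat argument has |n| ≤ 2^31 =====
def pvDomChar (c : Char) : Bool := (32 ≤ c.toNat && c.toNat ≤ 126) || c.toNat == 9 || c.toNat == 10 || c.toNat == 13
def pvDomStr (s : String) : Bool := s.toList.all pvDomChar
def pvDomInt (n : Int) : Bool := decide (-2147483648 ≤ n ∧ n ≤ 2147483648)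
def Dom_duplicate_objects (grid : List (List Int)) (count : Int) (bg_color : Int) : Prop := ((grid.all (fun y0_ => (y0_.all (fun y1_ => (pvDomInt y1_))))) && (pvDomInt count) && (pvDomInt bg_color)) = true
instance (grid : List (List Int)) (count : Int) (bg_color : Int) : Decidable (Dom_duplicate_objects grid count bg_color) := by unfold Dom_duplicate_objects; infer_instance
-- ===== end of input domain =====

-- B changes only the algorithm (no BFS, direct row construction); equivalence is about the return value, neither version mutates its argument.

-- ===== PORT A =====
-- grid[r][c] with Nat indices (in range on every admitted input)
def pvCell (grid : List (List Int)) (r c : Nat) : Int := (grid.getD r []).getD c 0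

-- visited[r][c] read / write with Int coordinates (guarded 0 ≤ · before use, as in A)
def pvVGet (v : List (List Bool)) (r c : Int) : Bool := (v.getD r.toNat []).getD c.toNat false
def pvVSet (v : List (List Bool)) (r c : Int) : List (List Bool) :=
  v.set r.toNat ((v.getD r.toNat []).set c.toNat true)

-- neighbors list of bfs
def pvNeighbors (r c : Int) (connectivity : Int) : List (Int × Int) :=
  [(r-1, c), (r+1, c), (r, c-1), (r, c+1)] ++
    (if connectivity = 8 then [(r-1, c-1), (r-1, c+1), (r+1, c-1), (r+1, c+1)] else [])

-- the 'while queue' loop of bfs; fuel = h*w+1 only makes the loop total (each Python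
-- iteration pops one element and every enqueue marks a fresh cell visited, so at most
-- 1 + h*w iterations ever run and the fuel guard is unreachable)
def pvBfsLoop (grid : List (List Int)) (h w : Nat) (color : Int) (connectivity : Int) :
    Nat → List (Int × Int) → List (List Bool) → PySem.Set (Int × Int) →
    PySem.Set (Int × Int) × List (List Bool)
  | _, [], visited, comp => (comp, visited)
  | 0, _ :: _, visited, comp => (comp, visited)
  | fuel+1, (r, c) :: rest, visited, comp =>
    let comp' := PySem.Set.add comp (r, c)
    let step := (pvNeighbors r c connectivity).foldl
      (fun (s : List (List Bool) × List (Int × Int)) nb =>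
        if 0 ≤ nb.1 ∧ nb.1 < (h : Int) ∧ 0 ≤ nb.2 ∧ nb.2 < (w : Int) ∧ pvVGet s.1 nb.1 nb.2 = false then
          (if pvCell grid nb.1.toNat nb.2.toNat = color then (pvVSet s.1 nb.1 nb.2, s.2 ++ [nb]) else s)
        else s)
      (visited, [])
    pvBfsLoop grid h w color connectivity fuel (rest ++ step.2) step.1 comp'

def pvBfs (grid : List (List Int)) (h w : Nat) (visited : List (List Bool)) (r c : Nat)
    (color connectivity : Int) : PySem.Set (Int × Int) × List (List Bool) :=
  pvBfsLoop grid h w color connectivity (h * w + 1) [((r : Int), (c : Int))]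
    (pvVSet visited (r : Int) (c : Int)) PySem.Set.empty

def find_connected_components (grid : List (List Int)) (bg_color : Int) (connectivity : Int) :
    List (PySem.Set (Int × Int)) :=
  if grid = [] then []
  else
    let h := grid.length
    let w := (grid.headD []).length
    let init : List (List Bool) := List.replicate h (List.replicate w false)
    let final := (List.range h).foldl (fun st r =>
      (List.range w).foldl
        (fun (st : List (List Bool) × List (PySem.Set (Int × Int))) c =>
          if ((st.1.getD r []).getD c false) = false ∧ pvCell grid r c ≠ bg_color then
            let res := pvBfs grid h w st.1 r c (pvCell grid r c) connectivity
            if res.1 ≠ [] then (res.2, st.2 ++ [res.1]) else (res.2, st.2)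
          else st)
        st) (init, [])
    final.2

def duplicate_objects (grid : List (List Int)) (count : Int) (bg_color : Int) : List (List Int) :=
  let components := find_connected_components grid bg_color 4
  if components = [] ∨ count < 1 then grid
  else
    let h := grid.length
    let w := (grid.headD []).length
    let result : List (List Int) := List.replicate h (List.replicate (((w : Int) * count).toNat) bg_color)
    (PySem.List.pyRange 0 count 1).foldl (fun result i =>
      let offset := (w : Int) * i
      (List.range h).foldl (fun result r =>
        (List.range w).foldl
          (fun (result : List (List Int)) (c : Nat) =>
            result.set r ((result.getD r []).set (offset + (c : Int)).toNat (pvCell grid r c)))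
          result) result) result

-- ===== PORT B =====
def duplicate_objects_alt (grid : List (List Int)) (count : Int) (bg_color : Int) : List (List Int) :=
  if grid = [] then grid
  else
    let h := grid.length
    let w := (grid.headD []).length
    let has := (List.range h).any (fun r => (List.range w).any (fun c => (grid.getD r []).getD c 0 ≠ bg_color))
    if has = false ∨ count < 1 then grid
    else (List.range h).map (fun r => (List.replicate count.toNat ((grid.getD r []).take w)).flatten)

-- ===== PRECONDITION & SPEC =====
-- Pre_ excludes ragged grids (a row shorter than the first row): there A raises IndexError.
def Pre_duplicate_objects (grid : List (List Int)) (count : Int) (bg_color : Int) : Prop :=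
  ∀ row ∈ grid, (grid.headD []).length ≤ row.length
instance (grid : List (List Int)) (count : Int) (bg_color : Int) : Decidable (Pre_duplicate_objects grid count bg_color) := by unfold Pre_duplicate_objects; infer_instance

def pvWitness_duplicate_objects : List (List Int) × Int × Int := ([[1, 0], [0, 2]], 2, 0)

def Spec_duplicate_objects (grid : List (List Int)) (count : Int) (bg_color : Int) (out : List (List Int)) : Prop := out = duplicate_objects_alt grid count bg_color
instance (grid : List (List Int)) (count : Int) (bg_color : Int) (out : List (List Int)) : Decidable (Spec_duplicate_objects grid count bg_color out) := by unfold Spec_duplicate_objects; infer_instance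

-- ===== CLAIM (what is proved, stated in full; the proofs are below) =====
def Claim_equal_duplicate_objects : Prop := ∀ (grid : List (List Int)) (count : Int) (bg_color : Int), Dom_duplicate_objects grid count bg_color → Pre_duplicate_objects grid count bg_color → Spec_duplicate_objects grid count bg_color (duplicate_objects grid count bg_color)

-- ===== LEMMAS AND PROOFS =====

-- a cell of grid is non-background somewhere in the h × w rectangle
def pvE (grid : List (List Int)) (bg : Int) : Prop :=
  ∃ r < grid.length, ∃ c < (grid.headD []).length, pvCell grid r c ≠ bg

-- generic fold facts used to analyse A's scan loop
theorem pv_foldl_id {α σ : Type} (l : List α) (f : σ → α → σ) (s : σ)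
    (h : ∀ s x, x ∈ l → f s x = s) : l.foldl f s = s := by
  induction l generalizing s with
  | nil => rfl
  | cons y t ih =>
    rw [List.foldl_cons, h s y (by simp)]
    exact ih s (fun s x hx => h s x (by simp [hx]))

theorem pv_foldl_pres {α σ : Type} (Q : σ → Prop) (l : List α) (f : σ → α → σ)
    (h : ∀ s x, x ∈ l → Q s → Q (f s x)) : ∀ s, Q s → Q (l.foldl f s) := by
  induction l with
  | nil => intro s hs; exact hs
  | cons y t ih =>
    intro s hs
    exact ih (fun s x hx => h s x (by simp [hx])) (f s y) (h s y (by simp) hs)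

theorem pv_foldl_reach {α σ : Type} (Inv Q : σ → Prop) (l : List α) (f : σ → α → σ) (x : α)
    (hx : x ∈ l)
    (hI : ∀ s y, y ∈ l → Inv s → Inv (f s y))
    (hQ : ∀ s y, y ∈ l → Q s → Q (f s y))
    (hx' : ∀ s, Inv s → Q (f s x)) : ∀ s, Inv s → Q (l.foldl f s) := by
  induction l with
  | nil => cases hx
  | cons y t ih =>
    intro s hs
    rcases List.mem_cons.mp hx with rfl | hxt
    · exact pv_foldl_pres Q t f (fun s z hz => hQ s z (by simp [hz])) (f s x) (hx' s hs)
    · exact ih hxt (fun s z hz h' => hI s z (by simp [hz]) h')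
        (fun s z hz h' => hQ s z (by simp [hz]) h') (f s y) (hI s y (by simp) hs)

theorem pv_foldl_congr_inv {α σ : Type} (Inv : σ → Prop) (l : List α) (f g : σ → α → σ)
    (hfg : ∀ s x, x ∈ l → Inv s → f s x = g s x)
    (hInv : ∀ s x, x ∈ l → Inv s → Inv (g s x)) :
    ∀ s, Inv s → l.foldl f s = l.foldl g s := by
  induction l with
  | nil => intro s _; rfl
  | cons y t ih =>
    intro s hs
    rw [List.foldl_cons, List.foldl_cons, hfg s y (by simp) hs]
    exact ih (fun s x hx h' => hfg s x (by simp [hx]) h')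
      (fun s x hx h' => hInv s x (by simp [hx]) h') (g s y) (hInv s y (by simp) hs)

-- the bfs component always keeps at least its start cell
theorem pv_add_ne_nil {α : Type} [BEq α] (s : PySem.Set α) (x : α) :
    PySem.Set.add s x ≠ [] := by
  cases s with
  | nil => simp [PySem.Set.add]
  | cons a t => unfold PySem.Set.add; split <;> simp

theorem pv_bfsLoop_ne_nil (grid : List (List Int)) (h w : Nat) (color conn : Int) :
    ∀ (fuel : Nat) (q : List (Int × Int)) (v : List (List Bool)) (comp : PySem.Set (Int × Int)),
      comp ≠ [] → (pvBfsLoop grid h w color conn fuel q v comp).1 ≠ [] := by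
  intro fuel
  induction fuel with
  | zero => intro q v comp hc; cases q <;> simpa [pvBfsLoop] using hc
  | succ n ih =>
    intro q v comp hc
    cases q with
    | nil => simpa [pvBfsLoop] using hc
    | cons p rest =>
      rw [pvBfsLoop]
      exact ih _ _ _ (pv_add_ne_nil comp (p.1, p.2))

theorem pv_bfs_ne_nil (grid : List (List Int)) (h w : Nat) (v : List (List Bool)) (r c : Nat)
    (color conn : Int) : (pvBfs grid h w v r c color conn).1 ≠ [] := by
  unfold pvBfs
  rw [pvBfsLoop]
  exact pv_bfsLoop_ne_nil grid h w color conn _ _ _ _ (pv_add_ne_nil PySem.Set.empty _)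

-- A's scan produces no component iff every cell is background
theorem pv_components_nil_iff (grid : List (List Int)) (bg conn : Int) (hg : grid ≠ []) :
    (find_connected_components grid bg conn = [] ↔ ¬ pvE grid bg) := by
  simp only [find_connected_components, if_neg hg]
  constructor
  · -- = [] → no non-bg cell; contrapositive: a non-bg cell forces a component
    intro hnil hE
    obtain ⟨r0, hr0, c0, hc0, hne⟩ := hE
    set h := grid.length with hh
    set w := (grid.headD []).length with hw
    set g := fun (st : List (List Bool) × List (PySem.Set (Int × Int))) (r c : Nat) =>
      if ((st.1.getD r []).getD c false) = false ∧ pvCell grid r c ≠ bg then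
        let res := pvBfs grid h w st.1 r c (pvCell grid r c) conn
        if res.1 ≠ [] then (res.2, st.2 ++ [res.1]) else (res.2, st.2)
      else st with hgdef
    have cellQ : ∀ st (r c : Nat), st.2 ≠ [] → (g st r c).2 ≠ [] := by
      intro st r c hst
      rw [hgdef]; dsimp only
      split
      · split
        · simp
        · exact hst
      · exact hst
    have cellInv : ∀ st (r c : Nat),
        (st.2 ≠ [] ∨ ∀ a b : Nat, ((st.1.getD a []).getD b false) = false) →
        ((g st r c).2 ≠ [] ∨ ∀ a b : Nat, (((g st r c).1.getD a []).getD b false) = false) := by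
      intro st r c hst
      rcases hst with hst | hall
      · exact Or.inl (cellQ st r c hst)
      · rw [hgdef]; dsimp only
        split
        · split
          · left; simp
          · rename_i hres; exact absurd (pv_bfs_ne_nil grid h w st.1 r c _ conn) (by simpa using hres)
        · exact Or.inr hall
    have cellHit : ∀ st,
        (st.2 ≠ [] ∨ ∀ a b : Nat, ((st.1.getD a []).getD b false) = false) →
        (g st r0 c0).2 ≠ [] := by
      intro st hst
      rcases hst with hst | hall
      · exact cellQ st r0 c0 hst
      · rw [hgdef]; dsimp only
        rw [if_pos ⟨hall r0 c0, hne⟩]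
        split
        · simp
        · rename_i hres; exact absurd (pv_bfs_ne_nil grid h w st.1 r0 c0 _ conn) (by simpa using hres)
    have hfinal := pv_foldl_reach
      (fun st => st.2 ≠ [] ∨ ∀ a b : Nat, ((st.1.getD a []).getD b false) = false)
      (fun st => st.2 ≠ [])
      (List.range h)
      (fun st r => (List.range w).foldl (fun st c => g st r c) st)
      r0 (List.mem_range.mpr hr0)
      (fun s y _ hI => pv_foldl_pres _ (List.range w) _ (fun s x _ h' => cellInv s y x h') s hI)
      (fun s y _ hQ => pv_foldl_pres _ (List.range w) _ (fun s x _ h' => cellQ s y x h') s hQ)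
      (fun s hI => pv_foldl_reach _ _ (List.range w) _ c0 (List.mem_range.mpr hc0)
        (fun s z _ h' => cellInv s r0 z h') (fun s z _ h' => cellQ s r0 z h')
        (fun s h' => cellHit s h') s hI)
      (List.replicate h (List.replicate w false), [])
      (Or.inr (by
        intro a b
        rcases Nat.lt_or_ge a h with ha | ha
        · rcases Nat.lt_or_ge b w with hb | hb
          · simp [List.getD_eq_getElem?_getD, ha, hb]
          · simp [List.getD_eq_getElem?_getD, ha, Nat.not_lt.mpr hb]
        · simp [List.getD_eq_getElem?_getD, Nat.not_lt.mpr ha]))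
    exact hfinal hnil
  · -- no non-bg cell → every step of the scan is the identity
    intro hnE
    have : ∀ (st : List (List Bool) × List (PySem.Set (Int × Int))) (r : Nat), r ∈ List.range grid.length →
        (List.range (grid.headD []).length).foldl
          (fun (st : List (List Bool) × List (PySem.Set (Int × Int))) c =>
            if ((st.1.getD r []).getD c false) = false ∧ pvCell grid r c ≠ bg then
              let res := pvBfs grid grid.length (grid.headD []).length st.1 r c (pvCell grid r c) conn
              if res.1 ≠ [] then (res.2, st.2 ++ [res.1]) else (res.2, st.2)
            else st) st = st := by
      intro st r hr
      apply pv_foldl_id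
      intro s c hc
      have hbg : pvCell grid r c = bg := by
        by_contra hne
        exact hnE ⟨r, List.mem_range.mp hr, c, List.mem_range.mp hc, hne⟩
      rw [if_neg (by simp [hbg])]
    rw [pv_foldl_id _ _ _ this]

-- the c-loop touches only row r
theorem pv_fold_set_row (r : Nat) (g : Nat → Int) (pos : Nat → Nat) (w : Nat) :
    ∀ (res : List (List Int)), r < res.length →
      (List.range w).foldl (fun res c => res.set r ((res.getD r []).set (pos c) (g c))) res
        = res.set r ((List.range w).foldl (fun row c => row.set (pos c) (g c)) (res.getD r [])) := by
  induction w with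
  | zero =>
    intro res hr
    simp [List.range_zero, List.getD_eq_getElem?_getD, List.getElem?_eq_getElem hr]
  | succ n ih =>
    intro res hr
    simp only [List.range_succ, List.foldl_append, List.foldl_cons, List.foldl_nil]
    rw [ih res hr]
    have hget : ((res.set r ((List.range n).foldl (fun row c => row.set (pos c) (g c)) (res.getD r []))).getD r [])
        = (List.range n).foldl (fun row c => row.set (pos c) (g c)) (res.getD r []) := by
      simp [List.getD_eq_getElem?_getD, hr]
    rw [hget, List.set_set]

-- the r-loop applies an independent update to every row
theorem pv_fold_rows_mapIdx :
    ∀ (F : Nat → List Int → List Int) (res : List (List Int)),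
      (List.range res.length).foldl (fun res r => res.set r (F r (res.getD r []))) res
        = res.mapIdx F := by
  intro F res
  induction res generalizing F with
  | nil => simp
  | cons x xs ih =>
    have aux : ∀ (l : List Nat) (y : List Int) (zs : List (List Int)),
        l.foldl (fun acc r => acc.set (r+1) (F (r+1) (acc.getD (r+1) []))) (y :: zs)
          = y :: l.foldl (fun acc r => acc.set r (F (r+1) (acc.getD r []))) zs := by
      intro l
      induction l with
      | nil => intro y zs; rfl
      | cons a t iht =>
        intro y zs
        rw [List.foldl_cons, List.foldl_cons, List.set_cons_succ, List.getD_cons_succ]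
        exact iht _ _
    rw [List.length_cons, List.range_succ_eq_map, List.foldl_cons, List.foldl_map]
    have h0 : (x :: xs).set 0 (F 0 ((x :: xs).getD 0 [])) = F 0 x :: xs := by
      simp
    rw [h0, aux, ih (fun i => F (i+1)), List.mapIdx_cons]

theorem pv_mapIdx_map_range (h : Nat) (f : Nat → List Int) (F : Nat → List Int → List Int) :
    ((List.range h).map f).mapIdx F = (List.range h).map (fun r => F r (f r)) := by
  apply List.ext_getElem <;> simp [List.getElem_mapIdx]

-- writing a contiguous segment into a sufficiently long row
theorem pv_seg_write (g : Nat → Int) (off : Nat) :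
    ∀ (w : Nat) (row : List Int), off + w ≤ row.length →
      (List.range w).foldl (fun row c => row.set (off + c) (g c)) row
        = row.take off ++ (List.range w).map g ++ row.drop (off + w) := by
  intro w
  induction w with
  | zero => intro row hlen; simp
  | succ n ih =>
    intro row hlen
    rw [List.range_succ, List.foldl_append, List.foldl_cons, List.foldl_nil,
      ih row (by omega), List.map_append]
    have hA : ((row.take off) ++ (List.range n).map g).length = off + n := by
      simp; omega
    have hdrop : row.drop (off + n) = row[off + n]'(by omega) :: row.drop (off + n + 1) := by
      rw [List.drop_eq_getElem_cons (by omega)]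
    rw [List.append_assoc, ← List.append_assoc, List.set_append, if_neg (by omega), hA, hdrop]
    simp [Nat.add_assoc]

theorem pv_map_range_getD (gr : List Int) (w : Nat) (h : w ≤ gr.length) :
    (List.range w).map (fun c => gr.getD c 0) = gr.take w := by
  apply List.ext_getElem
  · simp [Nat.min_eq_left h]
  intro i h1 h2
  simp only [List.getElem_map, List.getElem_range, List.getD_eq_getElem?_getD]
  rw [List.getElem?_eq_getElem (by simp at h1; omega)]
  simp

theorem pv_flatten_replicate_succ (m : Nat) (s : List Int) :
    (List.replicate (m+1) s).flatten = (List.replicate m s).flatten ++ s := by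
  rw [List.replicate_succ']; simp

-- the i-loop fills one row: count copies of the first w cells of gr
theorem pv_row_fill (gr : List Int) (bg : Int) (w k : Nat) (hw : w ≤ gr.length) :
    (List.range k).foldl
        (fun row m => (List.range w).foldl (fun row c => row.set (w*m + c) (gr.getD c 0)) row)
        (List.replicate (w*k) bg)
      = (List.replicate k (gr.take w)).flatten := by
  have hs : (gr.take w).length = w := by simp [Nat.min_eq_left hw]
  have key : ∀ m, m ≤ k →
      (List.range m).foldl
        (fun row m => (List.range w).foldl (fun row c => row.set (w*m + c) (gr.getD c 0)) row)
        (List.replicate (w*k) bg)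
      = (List.replicate m (gr.take w)).flatten ++ List.replicate (w*(k-m)) bg := by
    intro m
    induction m with
    | zero => intro _; simp
    | succ n ihm =>
      intro hm
      rw [List.range_succ, List.foldl_append, List.foldl_cons, List.foldl_nil, ihm (by omega)]
      have hlenA : (List.replicate n (gr.take w)).flatten.length = w*n := by
        simp [hs]; ring
      have hmul : w*(n+1) ≤ w*k := Nat.mul_le_mul_left w hm
      have hlen2 : w*n + w ≤ ((List.replicate n (gr.take w)).flatten ++ List.replicate (w*(k-n)) bg).length := by
        simp only [List.length_append, hlenA, List.length_replicate]
        rw [Nat.mul_sub_left_distrib]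
        rw [Nat.mul_succ] at hmul
        have : w*n ≤ w*k := Nat.mul_le_mul_left w (by omega)
        omega
      rw [pv_seg_write (fun c => gr.getD c 0) (w*n) w _ hlen2]
      rw [List.take_left' hlenA, pv_map_range_getD gr w hw]
      have hdrop : ((List.replicate n (gr.take w)).flatten ++ List.replicate (w*(k-n)) bg).drop (w*n + w)
          = List.replicate (w*(k-(n+1))) bg := by
        rw [List.drop_append, List.drop_replicate,
          List.drop_eq_nil_of_le (by rw [hlenA]; omega), List.nil_append]
        simp only [hlenA]
        rw [show w*(k-n) - (w*n + w - w*n) = w*(k-(n+1)) from by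
          rw [Nat.mul_sub_left_distrib, Nat.mul_sub_left_distrib, Nat.mul_succ]; omega]
      rw [hdrop, pv_flatten_replicate_succ, List.append_assoc]
  have hk := key k le_rfl
  simpa using hk

-- B's scan finds a non-background cell iff one exists
theorem pv_alt_has (grid : List (List Int)) (bg : Int) :
    ((List.range grid.length).any (fun r => (List.range (grid.headD []).length).any
      (fun c => (grid.getD r []).getD c 0 ≠ bg)) = true) ↔ pvE grid bg := by
  simp [pvE, pvCell, List.any_eq_true, List.mem_range]

-- A's fill loops build exactly B's rows
theorem pv_fill_eq (grid : List (List Int)) (bg : Int) (k : Nat)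
    (hPre : ∀ row ∈ grid, (grid.headD []).length ≤ row.length) :
    (List.range k).foldl
      (fun res j => (List.range grid.length).foldl
        (fun res r => (List.range (grid.headD []).length).foldl
          (fun (res : List (List Int)) c =>
            res.set r ((res.getD r []).set ((grid.headD []).length*j + c) (pvCell grid r c))) res) res)
      (List.replicate grid.length (List.replicate ((grid.headD []).length * k) bg))
    = (List.range grid.length).map
        (fun r => (List.replicate k ((grid.getD r []).take (grid.headD []).length)).flatten) := by
  set h := grid.length with hh
  set w := (grid.headD []).length with hw
  have step_eq : ∀ (j : Nat) (res : List (List Int)), res.length = h →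
      (List.range h).foldl (fun res r => (List.range w).foldl
        (fun (res : List (List Int)) c => res.set r ((res.getD r []).set (w*j + c) (pvCell grid r c))) res) res
      = res.mapIdx (fun r row => (List.range w).foldl (fun row c => row.set (w*j + c) (pvCell grid r c)) row) := by
    intro j res hlen
    rw [pv_foldl_congr_inv (fun (res : List (List Int)) => res.length = h) (List.range h) _
      (fun res r => res.set r ((List.range w).foldl (fun row c => row.set (w*j+c) (pvCell grid r c)) (res.getD r [])))
      (fun s r hr hs => pv_fold_set_row r (fun c => pvCell grid r c) (fun c => w*j+c) w s (by rw [hs]; exact List.mem_range.mp hr))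
      (fun s r _ hs => by simpa using hs)
      res hlen]
    rw [show List.range h = List.range res.length from by rw [hlen]]
    exact pv_fold_rows_mapIdx (fun r row => (List.range w).foldl (fun row c => row.set (w*j + c) (pvCell grid r c)) row) res
  have key : ∀ m,
      (List.range m).foldl
        (fun res j => (List.range h).foldl
          (fun res r => (List.range w).foldl
            (fun (res : List (List Int)) c =>
              res.set r ((res.getD r []).set (w*j + c) (pvCell grid r c))) res) res)
        (List.replicate h (List.replicate (w * k) bg))
      = (List.range h).map (fun r =>
          (List.range m).foldl (fun row j => (List.range w).foldl (fun row c => row.set (w*j + c) (pvCell grid r c)) row)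
            (List.replicate (w*k) bg)) := by
    intro m
    induction m with
    | zero =>
      simp only [List.range_zero, List.foldl_nil]
      exact (by simp : (List.range h).map (fun _ => List.replicate (w*k) bg) = List.replicate h (List.replicate (w*k) bg)).symm
    | succ m ihm =>
      rw [List.range_succ, List.foldl_append, List.foldl_cons, List.foldl_nil, ihm,
        step_eq m _ (by simp), pv_mapIdx_map_range]
      simp only [List.foldl_append, List.foldl_cons, List.foldl_nil]
  rw [key k]
  apply List.map_congr_left
  intro r hr
  have hrh : r < h := List.mem_range.mp hr
  have hgr : grid.getD r [] ∈ grid := by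
    rw [List.getD_eq_getElem?_getD, List.getElem?_eq_getElem hrh]
    exact List.getElem_mem hrh
  exact pv_row_fill (grid.getD r []) bg w k (hPre _ hgr)

-- ===== VERDICT (by name: the statement is the Claim_ definition above) =====
theorem duplicate_objects_spec : Claim_equal_duplicate_objects := by
  intro grid count bg _hDom hPre
  unfold Spec_duplicate_objects
  by_cases hg : grid = []
  · subst hg
    simp [duplicate_objects, duplicate_objects_alt, find_connected_components]
  · have hcomp := pv_components_nil_iff grid bg 4 hg
    have hhas := pv_alt_has grid bg
    by_cases hE : pvE grid bg
    · by_cases hc : count < 1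
      · simp only [duplicate_objects, duplicate_objects_alt, if_neg hg]
        rw [if_pos (Or.inr hc), if_pos (Or.inr hc)]
      · simp only [duplicate_objects, duplicate_objects_alt, if_neg hg]
        rw [if_neg (not_or.mpr ⟨fun hnil => (hcomp.mp hnil) hE, hc⟩),
          if_neg (not_or.mpr ⟨by
            have htrue := hhas.mpr hE
            intro hf
            rw [hf] at htrue
            exact Bool.false_ne_true htrue, hc⟩)]
        have hk0 : 0 ≤ count := by omega
        rw [show count = ((count.toNat : Nat) : Int) from (Int.toNat_of_nonneg hk0).symm]
        rw [PySem.List.pyRange_one]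
        rw [show (((count.toNat : Nat) : Int) - 0).toNat = count.toNat from by omega]
        rw [List.foldl_map]
        have hidx : ∀ (j c : Nat),
            (((grid.headD []).length : Int)*(0 + (j:Int)) + (c:Int)).toNat = (grid.headD []).length*j + c := by
          intro j c
          rw [show (((grid.headD []).length:Int)*(0+(j:Int))+(c:Int)) = (((grid.headD []).length*j+c : Nat):Int) from by
            push_cast; ring, Int.toNat_natCast]
        simp only [hidx]
        rw [show (((grid.headD []).length:Int)*((count.toNat : Nat):Int)).toNat = (grid.headD []).length*count.toNat from by
          rw [show (((grid.headD []).length:Int)*((count.toNat : Nat):Int)) = (((grid.headD []).length*count.toNat : Nat):Int) from by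
            push_cast; ring, Int.toNat_natCast]]
        exact pv_fill_eq grid bg count.toNat hPre
    · simp only [duplicate_objects, duplicate_objects_alt, if_neg hg]
      rw [if_pos (Or.inl (hcomp.mpr hE)),
        if_pos (Or.inl (Bool.eq_false_iff.mpr (fun h => hE (hhas.mp h))))]
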